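-- pv_equiv track=rewrite | github.com/j-brzoz/autonomous_car | src/controllers/intersecions_with_avoidance/obstacle_detection.py | calculate_centers_of_segments
-- ===== SOURCE A (Python) =====
-- def calculate_centers_of_segments(num_segments, camera_width, camera_height):
--     segment_width = camera_width // num_segments
--     segment_height = camera_height // num_segments
--
--     segment_coordinates = []
--     for i in range(num_segments):
--         for j in range(num_segments):
--             # Calculate the center of each segment
--             segment_x_center = (j * segment_width + (j + 1) * segment_width) // 2
--             segment_y_center = (i * segment_height + (i + 1) * segment_height) // 2
--             segment_coordinates.append((segment_x_center, segment_y_center))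
--
--     return segment_coordinates
-- ===== SOURCE B (Python) =====
-- def calculate_centers_of_segments(num_segments, camera_width, camera_height):
--     segment_width = camera_width // num_segments
--     segment_height = camera_height // num_segments
--     segment_coordinates = []
--     i = 0
--     j = 0
--     x = segment_width // 2
--     y = segment_height // 2
--     while i < num_segments:
--         segment_coordinates.append((x, y))
--         j += 1
--         x += segment_width
--         if j == num_segments:
--             j = 0
--             x = segment_width // 2
--             i += 1
--             y += segment_height
--     return segment_coordinates
-- ===== Notes on version B (the rewrite author's own statement) =====
-- stated objective: alternative
-- what changed: The two nested for-loops with per-cell multiply-and-floor-divide center formulas are replaced by a single odometer-style while loop that maintains (i, j, x, y) state and obtains each center by strength reduction: x and y advance by segment_width/segment_height per step and reset at row wrap, so the loop body has no multiplications or divisions.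
import Mathlib
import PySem

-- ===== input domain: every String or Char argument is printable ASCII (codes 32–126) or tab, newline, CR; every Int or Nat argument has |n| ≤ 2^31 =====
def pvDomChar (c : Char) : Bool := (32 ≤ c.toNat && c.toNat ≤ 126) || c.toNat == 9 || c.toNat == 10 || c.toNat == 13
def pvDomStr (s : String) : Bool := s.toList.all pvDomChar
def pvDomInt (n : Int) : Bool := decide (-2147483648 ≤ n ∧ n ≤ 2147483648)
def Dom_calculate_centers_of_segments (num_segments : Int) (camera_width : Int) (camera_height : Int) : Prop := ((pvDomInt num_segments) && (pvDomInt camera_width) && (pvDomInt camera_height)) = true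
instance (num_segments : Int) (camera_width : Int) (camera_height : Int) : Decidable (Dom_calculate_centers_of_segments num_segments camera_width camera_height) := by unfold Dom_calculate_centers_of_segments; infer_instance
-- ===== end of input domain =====

-- B replaces the nested loops by a single odometer-style while loop whose (x, y) center
-- coordinates are strength-reduced (advanced by additions, reset at row wrap).

-- ===== PORT A =====
def calculate_centers_of_segments (num_segments : Int) (camera_width : Int) (camera_height : Int) : List (Int × Int) :=
  let segment_width := PySem.Int.floordiv camera_width num_segments
  let segment_height := PySem.Int.floordiv camera_height num_segments
  (PySem.List.pyRange 0 num_segments 1).foldl (fun acc i =>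
    (PySem.List.pyRange 0 num_segments 1).foldl (fun acc j =>
      acc ++ [(PySem.Int.floordiv (j * segment_width + (j + 1) * segment_width) 2,
               PySem.Int.floordiv (i * segment_height + (i + 1) * segment_height) 2)]) acc) []

-- ===== PORT B =====
-- the while loop of Source B, state (i, j, x, y, out); the Nat fuel is only a totality
-- device (it bounds the iteration count, at most num_segments^2, and is chosen large enough)
def pvLoopB (ns w h : Int) : Nat → Int → Int → Int → Int → List (Int × Int) → List (Int × Int)
  | 0, _, _, _, _, out => out
  | fuel+1, i, j, x, y, out =>
    if i < ns then
      let out' := out ++ [(x, y)]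
      if j + 1 = ns then
        pvLoopB ns w h fuel (i + 1) 0 (PySem.Int.floordiv w 2) (y + h) out'
      else
        pvLoopB ns w h fuel i (j + 1) (x + w) y out'
    else out

def calculate_centers_of_segments_alt (num_segments : Int) (camera_width : Int) (camera_height : Int) : List (Int × Int) :=
  let segment_width := PySem.Int.floordiv camera_width num_segments
  let segment_height := PySem.Int.floordiv camera_height num_segments
  pvLoopB num_segments segment_width segment_height
    (num_segments.toNat * num_segments.toNat + 1) 0 0
    (PySem.Int.floordiv segment_width 2) (PySem.Int.floordiv segment_height 2) []

-- ===== PRECONDITION & SPEC =====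
-- Pre_ excludes num_segments = 0, where Python A raises ZeroDivisionError.
def Pre_calculate_centers_of_segments (num_segments : Int) (camera_width : Int) (camera_height : Int) : Prop :=
  num_segments ≠ 0
instance (num_segments : Int) (camera_width : Int) (camera_height : Int) : Decidable (Pre_calculate_centers_of_segments num_segments camera_width camera_height) := by unfold Pre_calculate_centers_of_segments; infer_instance
def pvWitness_calculate_centers_of_segments : Int × Int × Int := (3, 100, 60)
def Spec_calculate_centers_of_segments (num_segments : Int) (camera_width : Int) (camera_height : Int) (out : List (Int × Int)) : Prop := out = calculate_centers_of_segments_alt num_segments camera_width camera_height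
instance (num_segments : Int) (camera_width : Int) (camera_height : Int) (out : List (Int × Int)) : Decidable (Spec_calculate_centers_of_segments num_segments camera_width camera_height out) := by unfold Spec_calculate_centers_of_segments; infer_instance

-- ===== CLAIM =====
def Claim_equal_calculate_centers_of_segments : Prop := ∀ (num_segments : Int) (camera_width : Int) (camera_height : Int), Dom_calculate_centers_of_segments num_segments camera_width camera_height → Pre_calculate_centers_of_segments num_segments camera_width camera_height → Spec_calculate_centers_of_segments num_segments camera_width camera_height (calculate_centers_of_segments num_segments camera_width camera_height)

-- ===== LEMMAS AND PROOFS =====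

-- k*s + s/2 = (2*k+1)*s/2 : correctness of the strength-reduced center coordinate
theorem pvCenter_split (k s : Int) : k * s + s / 2 = (2 * k + 1) * s / 2 := by
  rw [show (2 * k + 1) * s = s + (k * s) * 2 by ring,
      Int.add_mul_ediv_right _ _ (by norm_num : (2:Int) ≠ 0)]
  ring

theorem pvLoopB_done (ns w h : Int) (fuel : Nat) (i j x y : Int) (out : List (Int × Int))
    (hi : ¬ i < ns) : pvLoopB ns w h fuel i j x y out = out := by
  cases fuel <;> simp [pvLoopB, hi]

theorem pvLoopB_eq (ns w h : Int) (fuel : Nat) :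
    ∀ (i j x y : Int) (out : List (Int × Int)), 0 ≤ i → i < ns → 0 ≤ j → j < ns →
    x = j * w + PySem.Int.floordiv w 2 → y = i * h + PySem.Int.floordiv h 2 →
    (ns - i) * ns - j ≤ (fuel : Int) →
    pvLoopB ns w h fuel i j x y out =
      out ++ ((PySem.List.pyRange j ns 1).map (fun j' =>
          (PySem.Int.floordiv ((2 * j' + 1) * w) 2, PySem.Int.floordiv ((2 * i + 1) * h) 2))
        ++ (PySem.List.pyRange (i + 1) ns 1).flatMap (fun i' =>
          (PySem.List.pyRange 0 ns 1).map (fun j' =>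
            (PySem.Int.floordiv ((2 * j' + 1) * w) 2, PySem.Int.floordiv ((2 * i' + 1) * h) 2)))) := by
  induction fuel with
  | zero =>
    intro i j x y out hi0 hins hj0 hjns hx hy hfuel
    exfalso
    have h1 : (1 : Int) ≤ ns - i := by omega
    have h2 : (0 : Int) < ns := by omega
    have h3 : 1 * ns ≤ (ns - i) * ns := mul_le_mul_of_nonneg_right h1 h2.le
    simp only [Nat.cast_zero] at hfuel
    linarith
  | succ fuel ih =>
    intro i j x y out hi0 hins hj0 hjns hx hy hfuel
    simp only [pvLoopB, if_pos hins]
    by_cases hj : j + 1 = ns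
    · rw [if_pos hj]
      by_cases hi1 : i + 1 < ns
      · rw [ih (i + 1) 0 _ _ _ (by omega) hi1 le_rfl (by omega)
              (by ring) (by rw [hy]; ring) (by push_cast at hfuel ⊢; nlinarith)]
        rw [PySem.List.pyRange_one_cons hjns, show j + 1 = ns from hj,
            PySem.List.pyRange_one_eq_nil (le_refl ns),
            PySem.List.pyRange_one_cons hi1]
        simp [List.append_assoc, hx, hy]
        exact ⟨pvCenter_split _ _, pvCenter_split _ _⟩
      · rw [pvLoopB_done _ _ _ _ _ _ _ _ _ hi1]
        rw [PySem.List.pyRange_one_cons hjns, show j + 1 = ns from hj,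
            PySem.List.pyRange_one_eq_nil (le_refl ns),
            PySem.List.pyRange_one_eq_nil (by omega : ns ≤ i + 1)]
        simp [hx, hy]
        exact ⟨pvCenter_split _ _, pvCenter_split _ _⟩
    · rw [if_neg hj]
      have hj1 : j + 1 < ns := by omega
      rw [ih i (j + 1) _ _ _ hi0 hins (by omega) hj1
            (by rw [hx]; ring) hy (by push_cast at hfuel ⊢; nlinarith)]
      rw [PySem.List.pyRange_one_cons hjns]
      simp [List.append_assoc, hx, hy]
      exact ⟨pvCenter_split _ _, pvCenter_split _ _⟩

-- ===== VERDICT =====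
theorem calculate_centers_of_segments_spec : Claim_equal_calculate_centers_of_segments := by
  intro ns cw ch _ _
  unfold Spec_calculate_centers_of_segments calculate_centers_of_segments calculate_centers_of_segments_alt
  by_cases hns : 0 < ns
  · have hfuel : (ns - 0) * ns - 0 ≤ ((ns.toNat * ns.toNat + 1 : Nat) : Int) := by
      have h := Int.toNat_of_nonneg hns.le
      push_cast [h]
      nlinarith
    rw [pvLoopB_eq ns _ _ _ 0 0 _ _ [] le_rfl hns le_rfl hns (by ring) (by ring) hfuel]
    simp only [PySem.List.foldl_append_singleton_eq_map, PySem.List.foldl_append_eq_flatMap,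
      List.nil_append]
    have hx : ∀ j : Int, j * PySem.Int.floordiv cw ns + (j + 1) * PySem.Int.floordiv cw ns
        = (2 * j + 1) * PySem.Int.floordiv cw ns := fun j => by ring
    have hy : ∀ i : Int, i * PySem.Int.floordiv ch ns + (i + 1) * PySem.Int.floordiv ch ns
        = (2 * i + 1) * PySem.Int.floordiv ch ns := fun i => by ring
    simp only [hx, hy]
    rw [PySem.List.pyRange_one_cons hns]
    simp
  · rw [pvLoopB_done _ _ _ _ _ _ _ _ _ hns]
    rw [PySem.List.pyRange_one_eq_nil (by omega : ns ≤ 0)]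
    simp
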